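-- pv_equiv track=rewrite | github.com/jax-md/jax-md | jax_md/_nn/uma/weight_conversion.py | _is_so3_linear_context
-- ===== SOURCE A (Python) =====
-- from typing import Any, Dict, List, Tuple
--
-- def _is_so3_linear_context(parts: List[str]) -> bool:
--   """Check if we're inside an SO3Linear layer."""
--   for p in parts:
--     if (
--       'so3_linear' in p.lower()
--       or p == 'linear'
--       and any('force' in x.lower() for x in parts)
--     ):
--       return True
--   return False
-- ===== SOURCE B (Python) =====
-- from typing import List
--
-- def _is_so3_linear_context(parts: List[str]) -> bool:
--   """Check if we're inside an SO3Linear layer."""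
--   has_so3 = has_linear = has_force = False
--   for p in parts:
--     pl = p.lower()
--     if 'so3_linear' in pl:
--       has_so3 = True
--     if p == 'linear':
--       has_linear = True
--     if 'force' in pl:
--       has_force = True
--   return has_so3 or (has_linear and has_force)
-- ===== Notes on version B (the rewrite author's own statement) =====
-- stated objective: alternative
-- what changed: Replaced A's short-circuiting loop that re-scans the whole list with a nested any() on each 'linear' hit by a single pass maintaining three boolean flags (lowering each part once), combined afterwards with A's precedence.
import Mathlib
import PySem

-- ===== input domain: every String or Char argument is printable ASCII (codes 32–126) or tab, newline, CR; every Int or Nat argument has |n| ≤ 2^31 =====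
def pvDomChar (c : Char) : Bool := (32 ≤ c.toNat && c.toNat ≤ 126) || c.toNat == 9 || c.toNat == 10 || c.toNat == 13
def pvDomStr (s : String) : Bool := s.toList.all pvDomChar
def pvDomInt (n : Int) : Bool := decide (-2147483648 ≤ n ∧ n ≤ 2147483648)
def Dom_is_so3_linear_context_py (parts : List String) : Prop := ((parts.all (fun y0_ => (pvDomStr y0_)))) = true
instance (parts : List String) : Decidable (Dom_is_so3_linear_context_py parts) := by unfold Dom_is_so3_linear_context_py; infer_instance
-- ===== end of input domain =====

-- B replaces A's short-circuiting loop (which re-scans all parts with a nested any on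
-- each 'linear' hit) by a single pass maintaining three boolean flags; objective: alternative.

-- ===== PORT A =====
-- the for-loop of A: returns True on the first p satisfying the condition, else False
def pvALoop (parts : List String) : List String → Bool
  | [] => false
  | p :: rest =>
    if PySem.Str.isIn "so3_linear" (PySem.Str.lower p)
        || (p == "linear" && parts.any (fun x => PySem.Str.isIn "force" (PySem.Str.lower x))) then
      true
    else
      pvALoop parts rest

def is_so3_linear_context_py (parts : List String) : Bool := pvALoop parts parts

-- ===== PORT B =====
-- single pass: fold over parts accumulating (has_so3, has_linear, has_force)
def pvBStep (s : Bool × Bool × Bool) (p : String) : Bool × Bool × Bool :=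
  let pl := PySem.Str.lower p
  (s.1 || PySem.Str.isIn "so3_linear" pl,
   s.2.1 || (p == "linear"),
   s.2.2 || PySem.Str.isIn "force" pl)

def is_so3_linear_context_py_alt (parts : List String) : Bool :=
  let s := parts.foldl pvBStep (false, false, false)
  s.1 || (s.2.1 && s.2.2)

-- ===== PRECONDITION & SPEC =====
def Spec_is_so3_linear_context_py (parts : List String) (out : Bool) : Prop := out = is_so3_linear_context_py_alt parts
instance (parts : List String) (out : Bool) : Decidable (Spec_is_so3_linear_context_py parts out) := by unfold Spec_is_so3_linear_context_py; infer_instance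

-- ===== CLAIM (what is proved, stated in full; the proofs are below) =====
def Claim_equal_is_so3_linear_context_py : Prop := ∀ (parts : List String), Dom_is_so3_linear_context_py parts → Spec_is_so3_linear_context_py parts (is_so3_linear_context_py parts)

-- ===== LEMMAS AND PROOFS =====

-- A's loop is `any` of its branch condition (the full `parts` is fixed for the nested scan)
theorem pvALoop_eq_any (parts rest : List String) :
    pvALoop parts rest
      = rest.any (fun p => PySem.Str.isIn "so3_linear" (PySem.Str.lower p)
          || (p == "linear" && parts.any (fun x => PySem.Str.isIn "force" (PySem.Str.lower x)))) := by
  induction rest with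
  | nil => rfl
  | cons p rest ih =>
    simp only [pvALoop, List.any_cons, ih]
    cases hc : (PySem.Str.isIn "so3_linear" (PySem.Str.lower p)
        || (p == "linear" && parts.any (fun x => PySem.Str.isIn "force" (PySem.Str.lower x)))) <;>
      simp only [Bool.false_eq_true, if_true, if_false, Bool.true_or, Bool.false_or]

-- B's fold computes the three `any`s, each or-ed onto its initial flag
theorem foldl_pvBStep (l : List String) (a b c : Bool) :
    l.foldl pvBStep (a, b, c)
      = (a || l.any (fun p => PySem.Str.isIn "so3_linear" (PySem.Str.lower p)),
         b || l.any (fun p => p == "linear"),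
         c || l.any (fun p => PySem.Str.isIn "force" (PySem.Str.lower p))) := by
  induction l generalizing a b c with
  | nil => simp
  | cons p l ih =>
    simp only [List.foldl_cons, pvBStep, ih, List.any_cons, Bool.or_assoc]

-- `any` of a disjunction splits; `any (p == "linear" && c)` is `any (p == "linear") && c`
theorem any_or_split (l : List String) (f g : String → Bool) :
    l.any (fun p => f p || g p) = (l.any f || l.any g) := by
  induction l with
  | nil => rfl
  | cons p l ih =>
    simp only [List.any_cons, ih]
    cases f p <;> cases g p <;> simp

theorem any_eq_and_const (l : List String) (c : Bool) :
    l.any (fun p => p == "linear" && c) = (l.any (fun p => p == "linear") && c) := by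
  induction l with
  | nil => cases c <;> rfl
  | cons p l ih =>
    simp only [List.any_cons, ih]
    cases c <;> cases (p == "linear") <;> cases (l.any (fun p => p == "linear")) <;> rfl

-- ===== VERDICT (by name: the statement is the Claim_ definition above) =====
theorem is_so3_linear_context_py_spec : Claim_equal_is_so3_linear_context_py := by
  intro parts _
  unfold Spec_is_so3_linear_context_py is_so3_linear_context_py is_so3_linear_context_py_alt
  rw [pvALoop_eq_any, any_or_split, any_eq_and_const, foldl_pvBStep]
  simp
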